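-- pv_equiv track=rewrite | github.com/randretsa/web-part-machine-learning | src/main/webapp/python/Characteristics.py | is_fixe_length
-- ===== SOURCE A (Python) =====
-- def is_fixe_length(language):
--     length = 0
--     if(language == []):
--         return 0
--     else:
--         length = len(language[0])
--
--     for word in language:
--         if(len(word)!=length):
--             return 0
--     return 1
-- ===== SOURCE B (Python) =====
-- def is_fixe_length(language):
--     if language == []:
--         return 0
--     return 1 if len({len(w) for w in language}) == 1 else 0
-- ===== Notes on version B (the rewrite author's own statement) =====
-- stated objective: idiomatic
-- what changed: Instead of comparing each word against the first word's length with an early exit, B builds the set of all distinct word lengths in one comprehension and tests whether it has exactly one element (empty list still returns 0).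
import Mathlib
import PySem

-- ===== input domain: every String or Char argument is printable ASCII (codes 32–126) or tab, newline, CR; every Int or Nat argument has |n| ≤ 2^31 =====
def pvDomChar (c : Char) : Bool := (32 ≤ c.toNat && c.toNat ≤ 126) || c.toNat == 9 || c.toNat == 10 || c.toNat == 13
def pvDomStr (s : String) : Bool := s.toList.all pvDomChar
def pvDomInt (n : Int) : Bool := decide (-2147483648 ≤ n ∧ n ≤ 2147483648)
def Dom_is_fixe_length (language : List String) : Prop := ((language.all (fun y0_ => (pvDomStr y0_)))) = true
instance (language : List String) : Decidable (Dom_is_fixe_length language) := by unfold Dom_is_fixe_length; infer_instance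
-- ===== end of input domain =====

-- B replaces A's compare-to-first-length loop with an early exit by the set of all
-- distinct word lengths, returning 1 iff that set has exactly one element (idiomatic).

-- ===== PORT A =====
-- the 'for word in language' loop: returns 0 on the first word whose length differs, else 1
def isFixeLoop (length : Int) : List String → Int
  | [] => 1
  | word :: rest => if PySem.Str.len word ≠ length then 0 else isFixeLoop length rest

def is_fixe_length (language : List String) : Int :=
  match language with
  | [] => 0
  | w :: _ => isFixeLoop (PySem.Str.len w) language

-- ===== PORT B =====
def is_fixe_length_alt (language : List String) : Int :=
  if language = [] then 0
  else if PySem.Set.len (PySem.Set.ofList (language.map PySem.Str.len)) = 1 then 1 else 0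

-- ===== PRECONDITION & SPEC =====
def Spec_is_fixe_length (language : List String) (out : Int) : Prop := out = is_fixe_length_alt language
instance (language : List String) (out : Int) : Decidable (Spec_is_fixe_length language out) := by unfold Spec_is_fixe_length; infer_instance

-- ===== CLAIM (what is proved, stated in full; the proofs are below) =====
def Claim_equal_is_fixe_length : Prop := ∀ (language : List String), Dom_is_fixe_length language → Spec_is_fixe_length language (is_fixe_length language)

-- ===== LEMMAS AND PROOFS =====
theorem isFixeLoop_eq (L : Int) (xs : List String) :
    isFixeLoop L xs = if ∀ w ∈ xs, PySem.Str.len w = L then 1 else 0 := by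
  induction xs with
  | nil => simp [isFixeLoop]
  | cons w ws ih =>
    simp only [isFixeLoop, ih, List.mem_cons, forall_eq_or_imp, ne_eq, ite_not]
    by_cases h : PySem.Str.len w = L
    · rw [if_pos h]
      by_cases h2 : ∀ x ∈ ws, PySem.Str.len x = L
      · rw [if_pos h2, if_pos ⟨h, h2⟩]
      · rw [if_neg h2, if_neg (fun hc => h2 hc.2)]
    · rw [if_neg h, if_neg (fun hc => h hc.1)]

theorem ofList_cons_len_one (a : Int) (l : List Int) :
    (PySem.Set.ofList (a :: l)).length = 1 ↔ ∀ x ∈ l, x = a := by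
  rw [PySem.Set.ofList_cons]
  have : (List.length ((PySem.Set.ofList l).discard a) + 1 = 1) ↔
      (PySem.Set.ofList l).discard a = [] := by
    constructor
    · intro h; exact List.length_eq_zero_iff.mp (by omega)
    · intro h; simp [h]
  simp only [List.length_cons, this, List.eq_nil_iff_forall_not_mem,
    PySem.Set.mem_discard, PySem.Set.mem_ofList]
  constructor
  · intro h x hx
    by_contra hne
    exact h x ⟨hx, hne⟩
  · intro h x hc
    exact hc.2 (h x hc.1)

-- ===== VERDICT (by name: the statement is the Claim_ definition above) =====
theorem is_fixe_length_spec : Claim_equal_is_fixe_length := by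
  intro language _
  unfold Spec_is_fixe_length is_fixe_length is_fixe_length_alt
  match language with
  | [] => rfl
  | w :: ws =>
    simp only [isFixeLoop_eq, reduceCtorEq, if_false, List.map_cons, PySem.Set.len]
    by_cases h : ∀ x ∈ ws, PySem.Str.len x = PySem.Str.len w
    · have hs : (PySem.Set.ofList (PySem.Str.len w :: ws.map PySem.Str.len)).length = 1 := by
        rw [ofList_cons_len_one]
        intro x hx
        obtain ⟨y, hy, rfl⟩ := List.mem_map.mp hx
        exact h y hy
      have hall : ∀ x ∈ w :: ws, PySem.Str.len x = PySem.Str.len w := by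
        intro x hx
        rcases List.mem_cons.mp hx with rfl | hx
        · rfl
        · exact h x hx
      rw [if_pos hall, if_pos (by exact_mod_cast hs)]
    · have hs : (PySem.Set.ofList (PySem.Str.len w :: ws.map PySem.Str.len)).length ≠ 1 := by
        rw [Ne, ofList_cons_len_one]
        intro hc
        exact h (fun x hx => hc _ (List.mem_map_of_mem hx))
      have hnot : ¬ ∀ x ∈ w :: ws, PySem.Str.len x = PySem.Str.len w := by
        intro hc
        exact h (fun x hx => hc x (List.mem_cons_of_mem _ hx))
      rw [if_neg hnot, if_neg (by intro hc; exact hs (by exact_mod_cast hc))]
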